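-- pv_equiv track=rewrite | github.com/sunlaetitia/projet_coffre_fort | fonction/cobra.py | convertir_texte_en_binaire
-- ===== SOURCE A (Python) =====
-- def convertir_texte_en_binaire(texte_codé):
--
--     #Convertit un texte lisible (avec \xHH pour les non imprimables) en une chaîne binaire.
--
--     i = 0
--     binaire_restitué = ''
--
--     while i < len(texte_codé):
--         if texte_codé[i] == '\\' and i + 3 < len(texte_codé) and texte_codé[i+1] == 'x':
--             # Lire le code hexadécimal
--             code_hex = texte_codé[i+2:i+4]
--             char = chr(int(code_hex, 16))
--             binaire_restitué += format(ord(char), '08b')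
--             i += 4  # Sauter les 4 caractères (\x..)
--         else:
--             # Traiter les caractères imprimables
--             binaire_restitué += format(ord(texte_codé[i]), '08b')
--             i += 1
--
--     return binaire_restitué
-- ===== SOURCE B (Python) =====
-- def convertir_texte_en_binaire(texte_codé):
--     # Two-phase: tokenize the string into integer code points, then format and join.
--     codes = []
--     rest = texte_codé
--     while rest:
--         if rest[:2] == '\\x' and len(rest) >= 4:
--             codes.append(int(rest[2:4], 16))
--             rest = rest[4:]
--         else:
--             codes.append(ord(rest[0]))
--             rest = rest[1:]
--     return ''.join(format(c, '08b') for c in codes)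
-- ===== Notes on version B (the rewrite author's own statement) =====
-- stated objective: alternative
-- what changed: B replaces A's fused index-stepping loop (which formats and concatenates while scanning with manual i += 1 / i += 4 arithmetic) by a two-phase pass: a suffix-consuming tokenizer that collects the integer code points into a list, then a single join over their '08b' formats.
import Mathlib
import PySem

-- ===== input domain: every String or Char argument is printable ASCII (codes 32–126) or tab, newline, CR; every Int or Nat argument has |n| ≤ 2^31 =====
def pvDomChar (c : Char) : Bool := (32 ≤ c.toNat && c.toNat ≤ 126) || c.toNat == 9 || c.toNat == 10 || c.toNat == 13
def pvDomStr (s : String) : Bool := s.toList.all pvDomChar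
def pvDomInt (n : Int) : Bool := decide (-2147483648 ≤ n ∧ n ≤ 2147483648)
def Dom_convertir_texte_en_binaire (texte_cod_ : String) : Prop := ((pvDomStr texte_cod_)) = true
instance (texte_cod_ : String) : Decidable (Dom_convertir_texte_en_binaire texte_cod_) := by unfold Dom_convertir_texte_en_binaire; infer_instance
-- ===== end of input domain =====

-- B replaces A's fused index-stepping loop by a two-phase pass (tokenize the string
-- into integer code points by consuming the suffix, then format and join); objective: alternative.


-- ===== PORT A =====
-- format(n, '08b')  (both Pythons call this; n ≥ 0 on every admitted input)
def pvFmt08 (n : Int) : List Char := PySem.Chars.zfill (PySem.Int.toBinChars n) 8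

-- the while loop of A: index i, string accumulator
def pvA_go (cs : List Char) (i : Nat) (acc : List Char) : List Char :=
  if _h : i < cs.length then
    if PySem.List.pyGet? cs (i : Int) = some '\\' ∧ i + 3 < cs.length ∧
        PySem.List.pyGet? cs ((i : Int) + 1) = some 'x' then
      let code_hex := PySem.List.slice cs (some ((i : Int) + 2)) (some ((i : Int) + 4))
      match PySem.Int.ofCharsBase? code_hex 16 with
      | some v =>
          -- chr(int(code_hex,16)) then ord(…) is the identity for 0 ≤ v (two hex chars give v ≤ 255);
          -- chr raises ValueError for v < 0: that input is outside Pre_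
          if 0 ≤ v then pvA_go cs (i + 4) (acc ++ pvFmt08 v) else acc
      | none => acc  -- int() raises ValueError: outside Pre_
    else
      match PySem.List.pyGet? cs (i : Int) with
      | some c => pvA_go cs (i + 1) (acc ++ pvFmt08 (c.toNat : Int))
      | none => acc  -- unreachable: i < len
  else acc
termination_by cs.length - i

def convertir_texte_en_binaire (texte_cod_ : String) : String :=
  String.ofList (pvA_go texte_cod_.toList 0 [])

-- ===== PORT B =====
-- the tokenizing while loop of B: consumes the suffix, collects integer code points
def pvB_tok (rest : List Char) (codes : List Int) : List Int :=
  if _h : rest ≠ [] then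
    if PySem.List.slice rest none (some 2) = ['\\', 'x'] ∧ 4 ≤ rest.length then
      match PySem.Int.ofCharsBase? (PySem.List.slice rest (some 2) (some 4)) 16 with
      | some v => pvB_tok (PySem.List.slice rest (some 4) none) (codes ++ [v])
      | none => codes  -- int() raises ValueError: outside Pre_
    else
      match rest with
      | c :: r => pvB_tok r (codes ++ [(c.toNat : Int)])
      | [] => codes  -- unreachable: rest ≠ []
  else codes
termination_by rest.length
decreasing_by
  · rename_i h
    obtain ⟨-, h4⟩ := h
    rw [show ((4 : Int)) = ((4 : Nat) : Int) by rfl, PySem.List.slice_from_natCast]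
    simp only [List.length_drop]
    omega
  · simp

def convertir_texte_en_binaire_alt (texte_cod_ : String) : String :=
  String.ofList (PySem.Chars.join [] ((pvB_tok texte_cod_.toList []).map pvFmt08))

-- ===== PRECONDITION & SPEC =====
-- Pre_ excludes exactly the inputs on which A raises: a '\x' with at least two following
-- characters that int(·,16) rejects (ValueError) or that parse to a negative value (chr raises).
def pvEscOk (t : List Char) : Bool :=
  match t with
  | c0 :: c1 :: a :: b :: _ =>
      if c0 = '\\' ∧ c1 = 'x' then
        match PySem.Int.ofCharsBase? [a, b] 16 with
        | some v => decide (0 ≤ v)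
        | none => false
      else true
  | _ => true

def Pre_convertir_texte_en_binaire (texte_cod_ : String) : Prop :=
  ∀ p < texte_cod_.toList.length, pvEscOk (texte_cod_.toList.drop p) = true
instance (texte_cod_ : String) : Decidable (Pre_convertir_texte_en_binaire texte_cod_) := by
  unfold Pre_convertir_texte_en_binaire; infer_instance

def pvWitness_convertir_texte_en_binaire : String := "A\\x42!"

def Spec_convertir_texte_en_binaire (texte_cod_ : String) (out : String) : Prop :=
  out = convertir_texte_en_binaire_alt texte_cod_
instance (texte_cod_ : String) (out : String) : Decidable (Spec_convertir_texte_en_binaire texte_cod_ out) := by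
  unfold Spec_convertir_texte_en_binaire; infer_instance

-- ===== CLAIM (what is proved, stated in full; the proofs are below) =====
def Claim_equal_convertir_texte_en_binaire : Prop :=
  ∀ (texte_cod_ : String), Dom_convertir_texte_en_binaire texte_cod_ →
    Pre_convertir_texte_en_binaire texte_cod_ →
    Spec_convertir_texte_en_binaire texte_cod_ (convertir_texte_en_binaire texte_cod_)

-- ===== LEMMAS AND PROOFS =====

-- ''.join is concatenation
theorem pvJoinNil (ps : List (List Char)) : PySem.Chars.join [] ps = ps.flatten := by
  induction ps with
  | nil => rfl
  | cons p ps ih =>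
    cases ps with
    | nil => simp [PySem.Chars.join, List.intercalate]
    | cons q qs => simpa [PySem.Chars.join_cons_cons] using ih

-- the tokenizer's accumulator factors out
theorem pvB_tok_acc_fuel (n : Nat) :
    ∀ (rest : List Char), rest.length ≤ n → ∀ codes,
      pvB_tok rest codes = codes ++ pvB_tok rest [] := by
  induction n with
  | zero =>
    intro rest hlen codes
    have : rest = [] := List.eq_nil_of_length_eq_zero (Nat.le_zero.mp hlen)
    subst this
    rw [pvB_tok, pvB_tok]
    simp
  | succ n ih =>
    intro rest hlen codes
    match rest with
    | [] => rw [pvB_tok, pvB_tok]; simp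
    | c :: r =>
      rw [pvB_tok, pvB_tok]
      by_cases hc : PySem.List.slice (c :: r) none (some 2) = ['\\', 'x'] ∧ 4 ≤ (c :: r).length
      · obtain ⟨hc1, hc2⟩ := hc
        have hlen4 : (PySem.List.slice (c :: r) (some 4) none).length ≤ n := by
          rw [show ((4 : Int)) = ((4 : Nat) : Int) by rfl, PySem.List.slice_from_natCast]
          simp only [List.length_drop, List.length_cons] at hc2 hlen ⊢
          omega
        cases hv : PySem.Int.ofCharsBase? (PySem.List.slice (c :: r) (some 2) (some 4)) 16 with
        | none =>
          simp only [List.cons_ne_nil, ne_eq, not_false_eq_true, dite_true, hc1, hc2,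
            and_self, if_true, List.append_nil]
        | some v =>
          simp only [List.cons_ne_nil, ne_eq, not_false_eq_true, dite_true, hc1, hc2,
            and_self, if_true]
          rw [ih _ hlen4 (codes ++ [v]), ih _ hlen4 ([] ++ [v])]
          simp
      · have hr : r.length ≤ n := by simp at hlen; omega
        simp only [List.cons_ne_nil, ne_eq, not_false_eq_true, dite_true, if_neg hc]
        rw [ih r hr (codes ++ [(c.toNat : Int)]), ih r hr ([] ++ [(c.toNat : Int)])]
        simp

theorem pvB_tok_acc (rest : List Char) (codes : List Int) :
    pvB_tok rest codes = codes ++ pvB_tok rest [] :=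
  pvB_tok_acc_fuel rest.length rest le_rfl codes

-- A's loop from index i computes the formatted tokens of the suffix
theorem pvA_go_end (cs : List Char) (i : Nat) (acc : List Char) (hi : ¬ i < cs.length) :
    pvA_go cs i acc = acc ++ ((pvB_tok (cs.drop i) []).map pvFmt08).flatten := by
  rw [pvA_go, dif_neg hi]
  rw [List.drop_eq_nil_of_le (Nat.le_of_not_lt hi), pvB_tok]
  simp

theorem pvA_go_eq_fuel (cs : List Char)
    (hpre : ∀ p < cs.length, pvEscOk (cs.drop p) = true) :
    ∀ (n : Nat) (i : Nat) (acc : List Char), cs.length - i ≤ n →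
      pvA_go cs i acc = acc ++ ((pvB_tok (cs.drop i) []).map pvFmt08).flatten := by
  intro n
  induction n with
  | zero =>
    intro i acc hfuel
    exact pvA_go_end cs i acc (by omega)
  | succ n ih =>
    intro i acc hfuel
    by_cases hi : i < cs.length
    · by_cases hc : PySem.List.pyGet? cs (i : Int) = some '\\' ∧ i + 3 < cs.length ∧
          PySem.List.pyGet? cs ((i : Int) + 1) = some 'x'
      · -- escape branch
        rw [pvA_go, dif_pos hi, if_pos hc]
        obtain ⟨h1, h2, h3⟩ := hc
        have hi1 : i + 1 < cs.length := by omega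
        have hi2 : i + 2 < cs.length := by omega
        have hi3 : i + 3 < cs.length := by omega
        have e0 : cs[i] = '\\' := by
          simp only [PySem.List.pyGet?_natCast] at h1
          exact (List.getElem?_eq_some_iff.mp h1).2
        have ecast : ((i : Int) + 1) = ((i + 1 : Nat) : Int) := by omega
        have e1 : cs[i + 1] = 'x' := by
          rw [ecast] at h3
          simp only [PySem.List.pyGet?_natCast] at h3
          exact (List.getElem?_eq_some_iff.mp h3).2
        have hshape : cs.drop i = '\\' :: 'x' :: cs[i + 2] :: cs[i + 3] :: cs.drop (i + 4) := by
          rw [List.drop_eq_getElem_cons hi, List.drop_eq_getElem_cons hi1,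
            List.drop_eq_getElem_cons hi2, List.drop_eq_getElem_cons hi3, e0, e1]
        have hshape2 : cs.drop (i + 2) = cs[i + 2] :: cs[i + 3] :: cs.drop (i + 4) := by
          rw [List.drop_eq_getElem_cons hi2, List.drop_eq_getElem_cons hi3]
        have c2 : ((i : Int) + 2) = ((i + 2 : Nat) : Int) := by omega
        have c4 : ((i : Int) + 4) = ((i + 4 : Nat) : Int) := by omega
        have hsliceA : PySem.List.slice cs (some ((i : Int) + 2)) (some ((i : Int) + 4)) =
            [cs[i + 2], cs[i + 3]] := by
          rw [c2, c4, PySem.List.slice_natCast, hshape2,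
            show i + 4 - (i + 2) = 2 by omega]
          rfl
        have hesc := hpre i hi
        rw [hshape] at hesc
        simp only [pvEscOk, and_self, if_true] at hesc
        cases hv : PySem.Int.ofCharsBase? [cs[i + 2], cs[i + 3]] 16 with
        | none => rw [hv] at hesc; simp at hesc
        | some v =>
          rw [hv] at hesc
          have hvpos : (0 : Int) ≤ v := of_decide_eq_true hesc
          simp only [hsliceA, hv, if_pos hvpos]
          rw [ih (i + 4) (acc ++ pvFmt08 v) (by omega)]
          -- B side on the same suffix
          have hlen4 : (4 : Nat) ≤ ('\\' :: 'x' :: cs[i + 2] :: cs[i + 3] :: cs.drop (i + 4)).length := by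
            simp only [List.length_cons]
            omega
          have hsl2 : PySem.List.slice ('\\' :: 'x' :: cs[i + 2] :: cs[i + 3] :: cs.drop (i + 4)) none (some 2) = ['\\', 'x'] := by
            rw [show ((2 : Int)) = ((2 : Nat) : Int) by rfl, PySem.List.slice_to_natCast]
            rfl
          have hsl24 : PySem.List.slice ('\\' :: 'x' :: cs[i + 2] :: cs[i + 3] :: cs.drop (i + 4)) (some 2) (some 4) = [cs[i + 2], cs[i + 3]] := by
            rw [show ((2 : Int)) = ((2 : Nat) : Int) by rfl,
              show ((4 : Int)) = ((4 : Nat) : Int) by rfl, PySem.List.slice_natCast]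
            rfl
          have hsl4 : PySem.List.slice ('\\' :: 'x' :: cs[i + 2] :: cs[i + 3] :: cs.drop (i + 4)) (some 4) none = cs.drop (i + 4) := by
            rw [show ((4 : Int)) = ((4 : Nat) : Int) by rfl, PySem.List.slice_from_natCast]
            rfl
          conv_rhs => rw [hshape, pvB_tok]
          simp only [List.cons_ne_nil, ne_eq, not_false_eq_true, dite_true, hsl2, hlen4,
            and_self, if_true, hsl24, hv, hsl4]
          rw [pvB_tok_acc _ ([] ++ [v])]
          simp only [List.nil_append, List.map_nil, List.flatten_nil, List.map_cons, List.map_append, List.flatten_cons,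
            List.flatten_append, List.append_assoc]
      · -- literal branch
        have hget : PySem.List.pyGet? cs (i : Int) = some cs[i] := by
          simp [PySem.List.pyGet?_natCast, List.getElem?_eq_getElem hi]
        rw [pvA_go, dif_pos hi, if_neg hc, hget]
        show pvA_go cs (i + 1) (acc ++ pvFmt08 ((cs[i].toNat : Int))) =
          acc ++ ((pvB_tok (cs.drop i) []).map pvFmt08).flatten
        rw [ih (i + 1) (acc ++ pvFmt08 ((cs[i].toNat : Int))) (by omega)]
        have hshape : cs.drop i = cs[i] :: cs.drop (i + 1) := List.drop_eq_getElem_cons hi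
        have hncond : ¬ (PySem.List.slice (cs[i] :: cs.drop (i + 1)) none (some 2) = ['\\', 'x'] ∧
            4 ≤ (cs[i] :: cs.drop (i + 1)).length) := by
          rintro ⟨hsl, hlen4⟩
          have hlen : 4 ≤ cs.length - i := by
            simpa using hlen4
          have hi1 : i + 1 < cs.length := by omega
          have hshape1 : cs.drop (i + 1) = cs[i + 1] :: cs.drop (i + 2) :=
            List.drop_eq_getElem_cons hi1
          rw [hshape1, show ((2 : Int)) = ((2 : Nat) : Int) by rfl,
            PySem.List.slice_to_natCast] at hsl
          rw [show List.take 2 (cs[i] :: cs[i + 1] :: List.drop (i + 2) cs) =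
            [cs[i], cs[i + 1]] from rfl] at hsl
          simp only [List.cons.injEq, and_true] at hsl
          exact hc ⟨by simp [List.getElem?_eq_getElem hi, hsl.1], by omega,
            by rw [show ((i : Int) + 1) = ((i + 1 : Nat) : Int) by omega,
                 PySem.List.pyGet?_natCast, List.getElem?_eq_getElem hi1, hsl.2]⟩
        conv_rhs => rw [hshape, pvB_tok]
        simp only [List.cons_ne_nil, ne_eq, not_false_eq_true, dite_true, if_neg hncond]
        rw [pvB_tok_acc _ ([] ++ [(cs[i].toNat : Int)])]
        simp only [List.nil_append, List.map_nil, List.flatten_nil, List.map_cons, List.map_append, List.flatten_cons,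
          List.flatten_append, List.append_assoc]
    · exact pvA_go_end cs i acc hi

theorem pvA_go_eq (cs : List Char)
    (hpre : ∀ p < cs.length, pvEscOk (cs.drop p) = true) :
    ∀ i acc, i ≤ cs.length →
      pvA_go cs i acc = acc ++ ((pvB_tok (cs.drop i) []).map pvFmt08).flatten := by
  intro i acc _
  exact pvA_go_eq_fuel cs hpre (cs.length - i) i acc le_rfl

-- ===== VERDICT (by name: the statement is the Claim_ definition above) =====
theorem convertir_texte_en_binaire_spec : Claim_equal_convertir_texte_en_binaire := by
  intro s _hdom hpre
  unfold Spec_convertir_texte_en_binaire convertir_texte_en_binaire convertir_texte_en_binaire_alt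
  rw [pvJoinNil, pvA_go_eq s.toList hpre 0 [] (Nat.zero_le _)]
  simp
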